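-- pv_equiv track=rewrite | github.com/ZekeMiller/euler-solutions | 26_decimal_repititions/fraction_repititions.py | periodMax
-- ===== SOURCE A (Python) =====
-- def genPrimes( max ):
--     primes = [2]
--     for i in range( 3, max, 2 ):
--         for k in primes:
--             if i % k == 0:
--                 break
--         primes += [ i ]
--     return primes
--
-- def multOrder( g, n ):
--     i = 1
--     while g ** i % n != 1:
--         i += 1
--     return i
--
-- def calcPeriod( val ):
--
--     if val % 2 == 0 or val % 5 == 0:    # rel prime to 10
--         return 0
--
--     return multOrder( 10, val )
--
-- def periodMax( bound ):
--     n = 0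
--     val = 0
--     for i in genPrimes( bound ):
--         p = calcPeriod( i )
--         if p > n:
--             val = i
--             n = p
--     return n, val
-- ===== SOURCE B (Python) =====
-- def periodMax(bound):
--     maxPeriod = 0
--     bestVal = 0
--     for i in range(2, bound):
--         if i % 2 == 0 or i % 5 == 0:
--             continue
--         r = 10 % i
--         period = 1
--         while r != 1:
--             r = r * 10 % i
--             period += 1
--         if period > maxPeriod:
--             maxPeriod = period
--             bestVal = i
--     return maxPeriod, bestVal
-- ===== Notes on version B (the rewrite author's own statement) =====
-- stated objective: faster
-- what changed: One pass over range(2, bound) with the period computed by iterating the running remainder r = r*10 % i, replacing A's build-the-candidate-list-then-scan and its multOrder that recomputes the full big-integer power 10**i for every tested exponent.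
import Mathlib
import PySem

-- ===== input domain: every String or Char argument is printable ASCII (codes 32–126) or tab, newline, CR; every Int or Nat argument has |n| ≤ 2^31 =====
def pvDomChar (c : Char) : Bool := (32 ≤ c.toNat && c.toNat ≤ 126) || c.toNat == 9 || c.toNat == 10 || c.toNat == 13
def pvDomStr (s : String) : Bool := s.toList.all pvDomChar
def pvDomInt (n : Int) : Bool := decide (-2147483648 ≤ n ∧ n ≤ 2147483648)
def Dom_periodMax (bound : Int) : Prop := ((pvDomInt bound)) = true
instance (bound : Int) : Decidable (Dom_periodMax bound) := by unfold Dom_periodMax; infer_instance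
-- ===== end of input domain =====

-- B replaces A's build-the-candidate-list-then-scan (with a fresh big-integer power 10**i
-- per tested exponent) by a single pass over range(2, bound) that carries the remainder
-- r = r*10 % i; measurably faster (objective: faster).

-- ===== PORT A =====
-- 'while g ** i % n != 1: i += 1; return i', fuel-bounded to make it total
-- (on every value A actually reaches — odd i ≥ 3 not divisible by 5 — the order of 10
-- mod i is < i, so fuel n.toNat is never exhausted and the fallback is unreachable).
def multOrderGo (g n : Int) : Nat → Nat → Int
  | i, 0 => (i : Int)
  | i, fuel + 1 =>
      if PySem.Int.mod (g ^ i) n ≠ 1 then multOrderGo g n (i + 1) fuel else (i : Int)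

def multOrder (g n : Int) : Int := multOrderGo g n 1 n.toNat

def calcPeriod (val : Int) : Int :=
  if PySem.Int.mod val 2 = 0 ∨ PySem.Int.mod val 5 = 0 then 0
  else multOrder 10 val

-- A's inner 'for k in primes: if i % k == 0: break' loop only breaks; it never prevents
-- the append, so it has no observable effect and the fold appends every i.
def genPrimes (max : Int) : List Int :=
  (PySem.List.pyRange 3 max 2).foldl (fun primes i => primes ++ [i]) [2]

def periodMax (bound : Int) : Int × Int :=
  (genPrimes bound).foldl
    (fun s i =>
      let p := calcPeriod i
      if p > s.1 then (p, i) else s)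
    (0, 0)

-- ===== PORT B =====
-- 'r = 10 % i; period = 1; while r != 1: r = r * 10 % i; period += 1', fuel-bounded
-- (the period of 1/i for the i reached here is < i, so fuel i.toNat is never exhausted).
def periodGo (i : Int) : Int → Int → Nat → Int
  | _, period, 0 => period
  | r, period, fuel + 1 =>
      if r ≠ 1 then periodGo i (PySem.Int.mod (r * 10) i) (period + 1) fuel else period

def periodMax_alt (bound : Int) : Int × Int :=
  (PySem.List.pyRange 2 bound 1).foldl
    (fun s i =>
      if PySem.Int.mod i 2 = 0 ∨ PySem.Int.mod i 5 = 0 then s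
      else
        let period := periodGo i (PySem.Int.mod 10 i) 1 i.toNat
        if period > s.1 then (period, i) else s)
    (0, 0)

-- ===== PRECONDITION & SPEC =====
def Spec_periodMax (bound : Int) (out : Int × Int) : Prop := out = periodMax_alt bound
instance (bound : Int) (out : Int × Int) : Decidable (Spec_periodMax bound out) := by unfold Spec_periodMax; infer_instance

-- ===== CLAIM (what is proved, stated in full; the proofs are below) =====
def Claim_equal_periodMax : Prop := ∀ (bound : Int), Dom_periodMax bound → Spec_periodMax bound (periodMax bound)

-- ===== LEMMAS AND PROOFS =====

-- A's fold step and B's fold step, named for the proofs (definitionally the lambdas above).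
def stepA (s : Int × Int) (i : Int) : Int × Int :=
  let p := calcPeriod i
  if p > s.1 then (p, i) else s

def stepB (s : Int × Int) (i : Int) : Int × Int :=
  if PySem.Int.mod i 2 = 0 ∨ PySem.Int.mod i 5 = 0 then s
  else
    let period := periodGo i (PySem.Int.mod 10 i) 1 i.toNat
    if period > s.1 then (period, i) else s

-- The two inner loops run in lockstep: A tests 10^i from scratch, B carries 10^i mod n.
theorem go_eq (n : Int) (hn : 0 < n) :
    ∀ (fuel i : Nat),
      multOrderGo 10 n i fuel = periodGo n (PySem.Int.mod (10 ^ i) n) (i : Int) fuel := by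
  intro fuel
  induction fuel with
  | zero => intro i; rfl
  | succ f ih =>
    intro i
    have hmod : PySem.Int.mod (PySem.Int.mod (10 ^ i) n * 10) n
        = PySem.Int.mod (10 ^ (i + 1)) n := by
      rw [PySem.Int.mod_eq_emod_of_pos hn, PySem.Int.mod_eq_emod_of_pos hn,
        PySem.Int.mod_eq_emod_of_pos hn, pow_succ, Int.mul_emod,
        Int.emod_emod_of_dvd _ dvd_rfl, ← Int.mul_emod]
    simp only [multOrderGo, periodGo]
    split
    · rw [hmod, ih (i + 1)]; push_cast; ring_nf
    · rfl

theorem multOrder_eq_periodGo (n : Int) (hn : 0 < n) :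
    multOrder 10 n = periodGo n (PySem.Int.mod 10 n) 1 n.toNat := by
  have h := go_eq n hn n.toNat 1
  simpa [multOrder] using h

theorem stepA_skip (s : Int × Int) (i : Int)
    (hg : PySem.Int.mod i 2 = 0 ∨ PySem.Int.mod i 5 = 0) (hs : 0 ≤ s.1) :
    stepA s i = s := by
  simp only [stepA, calcPeriod, if_pos hg]
  split
  · omega
  · rfl

theorem stepA_nonneg (s : Int × Int) (i : Int) (hs : 0 ≤ s.1) : 0 ≤ (stepA s i).1 := by
  simp only [stepA]
  split
  · show 0 ≤ calcPeriod i
    omega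
  · exact hs

theorem foldl_stepA_nonneg (l : List Int) :
    ∀ (s : Int × Int), 0 ≤ s.1 → 0 ≤ (l.foldl stepA s).1 := by
  induction l with
  | nil => intro s hs; exact hs
  | cons x xs ih => intro s hs; exact ih _ (stepA_nonneg s x hs)

theorem stepB_eq_stepA (s : Int × Int) (i : Int) (hi : 0 < i) (hs : 0 ≤ s.1) :
    stepB s i = stepA s i := by
  by_cases hg : PySem.Int.mod i 2 = 0 ∨ PySem.Int.mod i 5 = 0
  · rw [stepB, if_pos hg, stepA_skip s i hg hs]
  · simp only [stepB, stepA, calcPeriod, if_neg hg, multOrder_eq_periodGo i hi]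

theorem foldl_stepB_eq_stepA (l : List Int) :
    ∀ (s : Int × Int), (∀ i ∈ l, 0 < i) → 0 ≤ s.1 →
      l.foldl stepB s = l.foldl stepA s := by
  induction l with
  | nil => intro s _ _; rfl
  | cons x xs ih =>
    intro s hl hs
    simp only [List.foldl_cons]
    rw [stepB_eq_stepA s x (hl x (by simp)) hs]
    exact ih _ (fun i hi => hl i (by simp [hi])) (stepA_nonneg s x hs)

-- pyRange 3 b 2 : extending the bound by one appends b exactly when b is odd.
theorem pyRange_step2_nil (b : Int) (hb : b ≤ 3) : PySem.List.pyRange 3 b 2 = [] := by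
  rw [PySem.List.pyRange_of_pos 3 b (by norm_num)]
  rw [if_neg (by omega)]
  simp

theorem pyRange_step2_succ_even (b : Int) (hb : 3 ≤ b) (he : b % 2 = 0) :
    PySem.List.pyRange 3 (b + 1) 2 = PySem.List.pyRange 3 b 2 := by
  rw [PySem.List.pyRange_of_pos 3 (b + 1) (by norm_num),
    PySem.List.pyRange_of_pos 3 b (by norm_num)]
  rw [if_pos (by omega), if_pos (by omega)]
  have : ((b + 1 - 3 + 2 - 1) / 2).toNat = ((b - 3 + 2 - 1) / 2).toNat := by omega
  rw [this]

theorem pyRange_step2_succ_odd (b : Int) (hb : 3 ≤ b) (ho : b % 2 = 1) :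
    PySem.List.pyRange 3 (b + 1) 2 = PySem.List.pyRange 3 b 2 ++ [b] := by
  rw [PySem.List.pyRange_of_pos 3 (b + 1) (by norm_num),
    PySem.List.pyRange_of_pos 3 b (by norm_num)]
  rw [if_pos (by omega)]
  have hcnt : ((b + 1 - 3 + 2 - 1) / 2).toNat = ((b - 3 + 2 - 1) / 2).toNat + 1 := by omega
  rw [hcnt, List.range_succ, List.map_append]
  congr 1
  · by_cases h3 : 3 < b
    · rw [if_pos h3]
    · have : b = 3 := by omega
      subst this
      rw [if_neg (by omega)]
      norm_num
  · simp only [List.map_cons, List.map_nil]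
    congr 1
    omega

theorem mod2_of_even (b : Int) (he : b % 2 = 0) : PySem.Int.mod b 2 = 0 := by
  rw [PySem.Int.mod_eq_emod_of_pos (by norm_num)]; exact he

-- Folding stepA over A's odd range equals folding it over the full range(2, bound):
-- even entries (and 2 itself) have period 0 and never update a nonnegative state.
theorem fold_range_eq (b : Int) :
    ∀ (s : Int × Int), 0 ≤ s.1 →
      (PySem.List.pyRange 3 b 2).foldl stepA s = (PySem.List.pyRange 2 b 1).foldl stepA s := by
  rcases lt_or_ge b 3 with hb | hb
  · intro s hs
    rw [pyRange_step2_nil b (by omega), PySem.List.pyRange_one_eq_nil (by omega)]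
  · induction b, hb using Int.le_induction with
    | base =>
      intro s hs
      rw [pyRange_step2_nil 3 (by omega)]
      have : PySem.List.pyRange 2 3 1 = [2] := by
        rw [show (3 : Int) = 2 + 1 by norm_num, PySem.List.pyRange_one_succ_right (by norm_num),
          PySem.List.pyRange_one_eq_nil (by norm_num)]
        rfl
      rw [this]
      simp only [List.foldl_cons, List.foldl_nil]
      rw [stepA_skip s 2 (Or.inl (mod2_of_even 2 (by norm_num))) hs]
    | succ b hb3 ih =>
      intro s hs
      rw [PySem.List.pyRange_one_succ_right (by omega : (2:Int) ≤ b), List.foldl_append]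
      rcases Int.emod_two_eq_zero_or_one b with he | ho
      · rw [pyRange_step2_succ_even b hb3 he, ih s hs]
        simp only [List.foldl_cons, List.foldl_nil]
        rw [stepA_skip _ b (Or.inl (mod2_of_even b he))
          (foldl_stepA_nonneg _ s hs)]
      · rw [pyRange_step2_succ_odd b hb3 ho, List.foldl_append, ih s hs]

theorem genPrimes_eq (bound : Int) : genPrimes bound = 2 :: PySem.List.pyRange 3 bound 2 := by
  rw [genPrimes, PySem.List.foldl_append_singleton]
  rfl

-- ===== VERDICT (by name: the statement is the Claim_ definition above) =====
theorem periodMax_spec : Claim_equal_periodMax := by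
  intro bound _
  show periodMax bound = periodMax_alt bound
  have hA : periodMax bound = (genPrimes bound).foldl stepA (0, 0) := rfl
  have hB : periodMax_alt bound = (PySem.List.pyRange 2 bound 1).foldl stepB (0, 0) := rfl
  rw [hA, hB, genPrimes_eq]
  simp only [List.foldl_cons]
  rw [stepA_skip (0, 0) 2 (Or.inl (mod2_of_even 2 (by norm_num))) (by norm_num)]
  rw [fold_range_eq bound (0, 0) (by norm_num)]
  exact (foldl_stepB_eq_stepA _ (0, 0)
    (fun i hi => by have := (PySem.List.mem_pyRange_one.mp hi).1; omega) (by norm_num)).symm
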